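-- pv_equiv track=rewrite | github.com/AmeyaDalvi/B551-Elements-of-Artificial-Intelligence | Assignment 1/part1/solver2021.py | colshiftD
-- ===== SOURCE A (Python) =====
-- def colshiftD(x,col):
--     temp = x[4][col-1]
--     for i in range(len(x),0,-1):
--         if i-1< 1:
--             break
--         x[i-1][col-1]= x[i-2][col-1]
--     x[0][col-1]=temp
--     return x
-- ===== SOURCE B (Python) =====
-- def colshiftD(x, col):
--     j = col - 1
--     column = [row[j] for row in x]
--     new = [column[4]] + column[:-1]
--     for row, v in zip(x, new):
--         row[j] = v
--     return x
-- ===== Notes on version B (the rewrite author's own statement) =====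
-- stated objective: alternative
-- what changed: A shifts the column in place with a single descending index loop over the grid; B instead gathers the column into an explicit list, rebuilds the rotated column as [col[4]] + col[:-1], and scatters it back over the rows.
import Mathlib
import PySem

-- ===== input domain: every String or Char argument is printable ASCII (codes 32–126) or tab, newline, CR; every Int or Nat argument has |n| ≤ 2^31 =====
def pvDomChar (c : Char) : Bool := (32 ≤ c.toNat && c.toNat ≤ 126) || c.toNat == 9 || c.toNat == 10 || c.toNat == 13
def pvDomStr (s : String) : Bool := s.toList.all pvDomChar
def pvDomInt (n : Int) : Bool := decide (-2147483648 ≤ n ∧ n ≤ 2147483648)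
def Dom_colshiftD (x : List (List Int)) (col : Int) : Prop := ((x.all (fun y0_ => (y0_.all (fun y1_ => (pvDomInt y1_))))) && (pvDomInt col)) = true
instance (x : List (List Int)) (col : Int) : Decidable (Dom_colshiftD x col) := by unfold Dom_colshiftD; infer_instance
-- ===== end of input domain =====

-- B replaces A's single in-place shifting loop by a gather/rebuild/scatter decomposition over an
-- explicit column list (objective: alternative; same cost). Both Pythons mutate x's rows in place
-- in the same way; the equivalence proved here is about the RETURN value.

-- ===== PORT A =====
-- the for-loop of A: recursion over the countdown range, the 'break' as an early return
def colshiftD_loop (col : Int) (is : List Int) (x : List (List Int)) : List (List Int) :=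
  match is with
  | [] => x
  | i :: rest =>
      if i - 1 < 1 then x
      else colshiftD_loop col rest
        (PySem.List.pySetD x (i - 1)
          (PySem.List.pySetD (PySem.List.pyGetD x (i - 1) []) (col - 1)
            (PySem.List.pyGetD (PySem.List.pyGetD x (i - 2) []) (col - 1) 0)))

def colshiftD (x : List (List Int)) (col : Int) : List (List Int) :=
  let temp := PySem.List.pyGetD (PySem.List.pyGetD x 4 []) (col - 1) 0
  let x1 := colshiftD_loop col (PySem.List.pyRange (x.length : Int) 0 (-1)) x
  PySem.List.pySetD x1 0 (PySem.List.pySetD (PySem.List.pyGetD x1 0 []) (col - 1) temp)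

-- ===== PORT B =====
def colshiftD_alt (x : List (List Int)) (col : Int) : List (List Int) :=
  let j := col - 1
  let column := x.map (fun row => PySem.List.pyGetD row j 0)
  let newc := PySem.List.pyGetD column 4 0 :: PySem.List.slice column none (some (-1))
  (x.zip newc).map (fun rv => PySem.List.pySetD rv.1 j rv.2)

-- ===== PRECONDITION & SPEC =====
-- Pre_ = exactly where A returns normally: x[4] must exist (at least 5 rows) and col-1 must be a
-- valid Python index into every row (every row is read or written at position col-1)
def Pre_colshiftD (x : List (List Int)) (col : Int) : Prop :=
  5 ≤ x.length ∧ ∀ row ∈ x, PySem.Raise.InRange row.length (col - 1)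
instance (x : List (List Int)) (col : Int) : Decidable (Pre_colshiftD x col) := by
  unfold Pre_colshiftD; infer_instance

def pvWitness_colshiftD : List (List Int) × Int :=
  ([[1, 2], [3, 4], [5, 6], [7, 8], [9, 10]], 2)

def Spec_colshiftD (x : List (List Int)) (col : Int) (out : List (List Int)) : Prop := out = colshiftD_alt x col
instance (x : List (List Int)) (col : Int) (out : List (List Int)) : Decidable (Spec_colshiftD x col out) := by unfold Spec_colshiftD; infer_instance

-- ===== CLAIM (what is proved, stated in full; the proofs are below) =====
def Claim_equal_colshiftD : Prop := ∀ (x : List (List Int)) (col : Int), Dom_colshiftD x col → Pre_colshiftD x col → Spec_colshiftD x col (colshiftD x col)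

-- ===== LEMMAS AND PROOFS =====

theorem loop_spec (col : Int) (m : Nat) (y : List (List Int)) (hm : m ≤ y.length) :
    colshiftD_loop col (PySem.List.pyRange (m : Int) 0 (-1)) y =
      y.mapIdx (fun k r =>
        if 1 ≤ k ∧ k < m then
          PySem.List.pySetD r (col - 1)
            (PySem.List.pyGetD (y.getD (k - 1) []) (col - 1) 0)
        else r) := by
  induction m generalizing y with
  | zero =>
      rw [PySem.List.pyRange_neg_one_eq_nil (by norm_num)]
      show y = _
      refine List.ext_getElem (by simp) ?_
      intro k h1 h2
      simp only [List.getElem_mapIdx]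
      rw [if_neg (by omega)]
  | succ m ih =>
      have hcons : PySem.List.pyRange ((m+1:Nat) : Int) 0 (-1)
          = ((m:Int)+1) :: PySem.List.pyRange (m:Int) 0 (-1) := by
        have := PySem.List.pyRange_neg_one_cons (a := (m:Int)+1) (b := 0) (by positivity)
        simpa using this
      rw [hcons]
      by_cases hm0 : m = 0
      · subst hm0
        rw [show colshiftD_loop col ((↑(0:Nat) + 1) :: PySem.List.pyRange (↑(0:Nat)) 0 (-1)) y = y by
          simp [colshiftD_loop]]
        refine List.ext_getElem (by simp) ?_
        intro k h1 h2
        simp only [List.getElem_mapIdx]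
        rw [if_neg (by omega)]
      · -- m ≥ 1, body fires
        have hm1 : 1 ≤ m := Nat.one_le_iff_ne_zero.mpr hm0
        simp only [colshiftD_loop, if_neg (by omega : ¬ ((m:Int)+1-1 < 1))]
        have e1 : ((m:Int)+1-1) = (m:Nat) := by omega
        have e2 : ((m:Int)+1-2) = ((m-1:Nat):Int) := by push_cast [hm1]; ring
        rw [e1, e2, PySem.List.pySetD_natCast, PySem.List.pyGetD_natCast, PySem.List.pyGetD_natCast]
        set v := PySem.List.pySetD (y.getD m []) (col - 1)
            (PySem.List.pyGetD (y.getD (m-1) []) (col - 1) 0) with hv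
        have hlen : (y.set m v).length = y.length := by simp
        rw [ih (y.set m v) (by omega)]
        refine List.ext_getElem (by simp) ?_
        intro k h1 h2
        have hk : k < y.length := by simpa using (by simpa using h1 : k < (y.set m v).length)
        simp only [List.getElem_mapIdx]
        rcases lt_trichotomy k m with h | h | h
        · have hne : m ≠ k := by omega
          have hset : (y.set m v)[k] = y[k] := List.getElem_set_ne hne _
          have hgetD : (y.set m v).getD (k-1) [] = y.getD (k-1) [] := by
            unfold List.getD
            rw [List.getElem?_set_ne (by omega)]
          rw [hset, hgetD]
          by_cases hc : 1 ≤ k ∧ k < m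
          · rw [if_pos hc, if_pos (by omega)]
          · rw [if_neg hc, if_neg (by omega)]
        · subst h
          have hset : (y.set k v)[k] = v := by
            rw [List.getElem_set_self]
          rw [if_neg (by omega), if_pos (by omega), hset, hv]
          have hg : y.getD k [] = y[k] := List.getD_eq_getElem y [] hk
          rw [hg]
          rfl
        · rw [if_neg (by omega), if_neg (by omega), List.getElem_set_ne (by omega) _]


theorem colshiftD_eq_alt (x : List (List Int)) (col : Int) (h5 : 5 ≤ x.length) :
    colshiftD x col = colshiftD_alt x col := by
  unfold colshiftD colshiftD_alt
  simp only [PySem.List.slice_to_neg_one]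
  rw [loop_spec col x.length x le_rfl]
  set g := fun (row : List Int) => PySem.List.pyGetD row (col - 1) (0:Int) with hg
  set z := x.mapIdx (fun k r =>
    if 1 ≤ k ∧ k < x.length then
      PySem.List.pySetD r (col - 1) (PySem.List.pyGetD (x.getD (k - 1) []) (col - 1) 0)
    else r) with hz
  have hzlen : z.length = x.length := by simp [hz]
  have hclen : (x.map g).length = x.length := by simp
  have hdlen : ((x.map g).dropLast).length = x.length - 1 := by simp
  have hnewlen : (g (PySem.List.pyGetD x 4 []) :: (x.map g).dropLast).length = x.length := by
    simp; omega
  refine List.ext_getElem (by simp [hzlen]; omega) ?_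
  intro k h1 h2
  have hk : k < x.length := by
    simpa [hzlen] using h1
  rw [List.getElem_map, List.getElem_zip]
  have h4 : PySem.List.pyGetD x 4 [] = x[4]'(by omega) := by
    rw [show (4:Int) = ((4:Nat):Int) by norm_num, PySem.List.pyGetD_natCast,
      List.getD_eq_getElem x [] (by omega)]
  have hc4 : PySem.List.pyGetD (x.map g) 4 0 = g (x[4]'(by omega)) := by
    rw [show (4:Int) = ((4:Nat):Int) by norm_num, PySem.List.pyGetD_natCast,
      List.getD_eq_getElem (x.map g) 0 (by simp; omega), List.getElem_map]
  have hset0 : ∀ w : List Int, PySem.List.pySetD z 0 w = z.set 0 w := by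
    intro w; simp [pysem]
  have hz0 : PySem.List.pyGetD z 0 [] = x[0]'(by omega) := by
    rw [PySem.List.pyGetD_zero, List.getD_eq_getElem z [] (by omega)]
    simp only [hz, List.getElem_mapIdx]
    rw [if_neg (by omega)]
  rcases Nat.eq_zero_or_pos k with hk0 | hk1
  · subst hk0
    simp only [hset0]
    rw [List.getElem_set_self, List.getElem_cons_zero]
    simp only [hz0, h4, hc4]
    rfl
  · obtain ⟨k', rfl⟩ : ∃ k', k = k' + 1 := ⟨k - 1, by omega⟩
    simp only [hset0]
    rw [List.getElem_set_ne (by omega) _]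
    simp only [hz, List.getElem_mapIdx]
    rw [if_pos (by omega), List.getD_eq_getElem x [] (by omega : k' + 1 - 1 < x.length),
      List.getElem_cons_succ, List.getElem_dropLast, List.getElem_map]
    rfl

-- ===== VERDICT (by name: the statement is the Claim_ definition above) =====
theorem colshiftD_spec : Claim_equal_colshiftD := by
  intro x col _ hpre
  unfold Spec_colshiftD
  exact colshiftD_eq_alt x col hpre.1
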